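-- pv_equiv track=rewrite | github.com/PMapa/Python | 9- Vetores2/PauloMapaQ3.py | contabilizarDemandas
-- ===== SOURCE A (Python) =====
-- def criarVetor(qtdElementos, valorPadrao):
--     vetor = [ ]
--     for i in range(qtdElementos):
--         vetor.append(valorPadrao)
--     return vetor
--
-- def contabilizarDemandas(idades):
--     vetor=criarVetor(4,0)
--     mOitenta=0
--     mSessenta=0
--     mQuarenta=0
--     mDezoito=0
--     for i in range (len(idades)):
--         if(idades[i] >= 85):
--             mOitenta+=1
--         elif(idades[i] >= 65):
--             mSessenta+=1
--         elif (idades[i] >= 45):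
--             mQuarenta+=1
--         elif (idades[i] >= 18):
--             mDezoito+=1
--     vetor[0]=mOitenta
--     vetor[1]=mSessenta
--     vetor[2]=mQuarenta
--     vetor[3]=mDezoito
--     return vetor
-- ===== SOURCE B (Python) =====
-- import bisect
--
-- def contabilizarDemandas(idades):
--     s = sorted(idades)
--     b18 = bisect.bisect_left(s, 18)
--     b45 = bisect.bisect_left(s, 45)
--     b65 = bisect.bisect_left(s, 65)
--     b85 = bisect.bisect_left(s, 85)
--     return [len(s) - b85, b85 - b65, b65 - b45, b45 - b18]
-- ===== Notes on version B (the rewrite author's own statement) =====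
-- stated objective: alternative
-- what changed: B sorts a copy of idades and computes each bracket count as a difference of bisect_left positions at the thresholds 18/45/65/85, instead of A's per-element if/elif comparison cascade with four counters.
import Mathlib
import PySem

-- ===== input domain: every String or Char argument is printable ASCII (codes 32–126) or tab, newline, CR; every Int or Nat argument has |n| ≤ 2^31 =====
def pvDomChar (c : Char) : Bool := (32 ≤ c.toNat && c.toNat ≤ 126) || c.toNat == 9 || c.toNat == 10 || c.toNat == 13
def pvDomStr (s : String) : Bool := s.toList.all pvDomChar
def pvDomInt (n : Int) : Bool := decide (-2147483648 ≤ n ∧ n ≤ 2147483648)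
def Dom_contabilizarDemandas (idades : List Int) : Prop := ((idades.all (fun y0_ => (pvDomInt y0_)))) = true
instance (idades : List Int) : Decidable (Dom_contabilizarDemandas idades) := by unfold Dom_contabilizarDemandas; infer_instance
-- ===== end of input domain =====

-- B counts the brackets as differences of bisect_left positions on a sorted copy instead of A's
-- per-element if/elif cascade (objective: alternative algorithm; return value only, no mutation).

-- ===== PORT A =====
def criarVetor (qtdElementos : Int) (valorPadrao : Int) : List Int :=
  (PySem.List.pyRange 0 qtdElementos 1).foldl (fun vetor _ => vetor ++ [valorPadrao]) []

def contabilizarDemandas (idades : List Int) : List Int :=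
  let vetor := criarVetor 4 0
  let st :=
    (PySem.List.pyRange 0 (PySem.List.len idades) 1).foldl
      (fun (st : Int × Int × Int × Int) i =>
        let x := PySem.List.pyGetD idades i 0   -- i ∈ range(len), always in range
        if 85 ≤ x then (st.1 + 1, st.2.1, st.2.2.1, st.2.2.2)
        else if 65 ≤ x then (st.1, st.2.1 + 1, st.2.2.1, st.2.2.2)
        else if 45 ≤ x then (st.1, st.2.1, st.2.2.1 + 1, st.2.2.2)
        else if 18 ≤ x then (st.1, st.2.1, st.2.2.1, st.2.2.2 + 1)
        else st)
      (0, 0, 0, 0)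
  let vetor := PySem.List.pySetD vetor 0 st.1
  let vetor := PySem.List.pySetD vetor 1 st.2.1
  let vetor := PySem.List.pySetD vetor 2 st.2.2.1
  let vetor := PySem.List.pySetD vetor 3 st.2.2.2
  vetor

-- ===== PORT B =====
def contabilizarDemandas_alt (idades : List Int) : List Int :=
  let s := PySem.List.sorted idades (fun x => x) false
  let b18 : Int := PySem.List.bisectLeft s 18
  let b45 : Int := PySem.List.bisectLeft s 45
  let b65 : Int := PySem.List.bisectLeft s 65
  let b85 : Int := PySem.List.bisectLeft s 85
  [PySem.List.len s - b85, b85 - b65, b65 - b45, b45 - b18]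

-- ===== PRECONDITION & SPEC =====
def Spec_contabilizarDemandas (idades : List Int) (out : List Int) : Prop := out = contabilizarDemandas_alt idades
instance (idades : List Int) (out : List Int) : Decidable (Spec_contabilizarDemandas idades out) := by unfold Spec_contabilizarDemandas; infer_instance

-- ===== CLAIM (what is proved, stated in full; the proofs are below) =====
def Claim_equal_contabilizarDemandas : Prop := ∀ (idades : List Int), Dom_contabilizarDemandas idades → Spec_contabilizarDemandas idades (contabilizarDemandas idades)

-- ===== LEMMAS AND PROOFS =====

-- bisect_left on an ascending list is the number of elements below the needle
theorem bisectLeft_eq_countP (xs : List Int) (t : Int) (h : xs.Pairwise (· ≤ ·)) :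
    PySem.List.bisectLeft xs t = xs.countP (fun x => decide (x < t)) := by
  obtain ⟨hle, hlt, hge⟩ := PySem.List.bisectLeft_spec xs t h
  set k := PySem.List.bisectLeft xs t with hk
  have hsplit : xs = xs.take k ++ xs.drop k := (List.take_append_drop k xs).symm
  have h1 : (xs.take k).countP (fun x => decide (x < t)) = k := by
    have hall : ∀ a ∈ xs.take k, decide (a < t) = true := by
      intro a ha
      obtain ⟨j, hj, rfl⟩ := List.mem_iff_getElem.mp ha
      have hjk : j < k := lt_of_lt_of_le hj (by simp [List.length_take])
      have hjlen : j < xs.length := lt_of_lt_of_le hjk hle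
      rw [List.getElem_take]
      exact decide_eq_true (hlt j hjlen hjk)
    rw [List.countP_eq_length.mpr hall]
    simp [List.length_take, Nat.min_eq_left hle]
  have h2 : (xs.drop k).countP (fun x => decide (x < t)) = 0 := by
    rw [List.countP_eq_zero]
    intro a ha
    obtain ⟨j, hj, rfl⟩ := List.mem_iff_getElem.mp ha
    rw [List.getElem_drop]
    simp only [decide_eq_true_eq, not_lt]
    exact hge (k + j) (by simp [List.length_drop] at hj; omega) (Nat.le_add_right _ _)
  conv_rhs => rw [hsplit]
  rw [List.countP_append, h1, h2]
  omega

-- two-threshold partition of the below-b count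
theorem countP_band (xs : List Int) (a b : Int) (hab : a ≤ b) :
    xs.countP (fun x => decide (x < b)) =
      xs.countP (fun x => decide (x < a)) + xs.countP (fun x => decide (a ≤ x ∧ x < b)) := by
  induction xs with
  | nil => rfl
  | cons y ys ih =>
    simp only [List.countP_cons, ih]
    by_cases h1 : y < a <;> by_cases h2 : y < b <;>
      split_ifs <;> simp_all <;> omega

-- the cascade fold counts each bracket predicate
theorem cascade_counts (xs : List Int) (a b c d : Int) :
    xs.foldl
      (fun (st : Int × Int × Int × Int) x =>
        if 85 ≤ x then (st.1 + 1, st.2.1, st.2.2.1, st.2.2.2)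
        else if 65 ≤ x then (st.1, st.2.1 + 1, st.2.2.1, st.2.2.2)
        else if 45 ≤ x then (st.1, st.2.1, st.2.2.1 + 1, st.2.2.2)
        else if 18 ≤ x then (st.1, st.2.1, st.2.2.1, st.2.2.2 + 1)
        else st)
      (a, b, c, d) =
      (a + xs.countP (fun x => decide (85 ≤ x)),
       b + xs.countP (fun x => decide (65 ≤ x ∧ x < 85)),
       c + xs.countP (fun x => decide (45 ≤ x ∧ x < 65)),
       d + xs.countP (fun x => decide (18 ≤ x ∧ x < 45))) := by
  induction xs generalizing a b c d with
  | nil => simp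
  | cons y ys ih =>
    simp only [List.foldl_cons, List.countP_cons, decide_eq_true_eq]
    split_ifs <;> rw [ih] <;> simp only [Prod.mk.injEq] <;>
      refine ⟨?_, ?_, ?_, ?_⟩ <;> push_cast <;> omega

-- below-85 plus at-least-85 exhausts the list
theorem countP_total (xs : List Int) :
    xs.countP (fun x => decide (x < 85)) + xs.countP (fun x => decide (85 ≤ x)) = xs.length := by
  induction xs with
  | nil => rfl
  | cons y ys ih =>
    simp only [List.countP_cons, List.length_cons]
    by_cases h : y < 85 <;> split_ifs <;> simp_all <;> omega

-- ===== VERDICT (by name: the statement is the Claim_ definition above) =====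
theorem contabilizarDemandas_spec : Claim_equal_contabilizarDemandas := by
  intro idades _
  unfold Spec_contabilizarDemandas contabilizarDemandas contabilizarDemandas_alt
  have hsorted : (PySem.List.sorted idades (fun x => x) false).Pairwise (· ≤ ·) := by
    simpa using PySem.List.sorted_pairwise idades (fun x => x)
  have hperm : (PySem.List.sorted idades (fun x => x) false).Perm idades :=
    PySem.List.sorted_perm idades (fun x => x) false
  have hcnt : ∀ t : Int,
      PySem.List.bisectLeft (PySem.List.sorted idades (fun x => x) false) t =
        idades.countP (fun x => decide (x < t)) := by
    intro t
    rw [bisectLeft_eq_countP _ t hsorted, hperm.countP_eq]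
  have hfold := PySem.List.foldl_pyRange_zero_pyGetD idades (0 : Int)
      (fun (st : Int × Int × Int × Int) x =>
        if 85 ≤ x then (st.1 + 1, st.2.1, st.2.2.1, st.2.2.2)
        else if 65 ≤ x then (st.1, st.2.1 + 1, st.2.2.1, st.2.2.2)
        else if 45 ≤ x then (st.1, st.2.1, st.2.2.1 + 1, st.2.2.2)
        else if 18 ≤ x then (st.1, st.2.1, st.2.2.1, st.2.2.2 + 1)
        else st)
      ((0 : Int), (0 : Int), (0 : Int), (0 : Int))
  simp only [PySem.List.len] at hfold ⊢
  rw [hfold, cascade_counts]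
  have hlen : (PySem.List.sorted idades (fun x => x) false).length = idades.length :=
    hperm.length_eq
  have hb1 := countP_band idades 65 85 (by norm_num)
  have hb2 := countP_band idades 45 65 (by norm_num)
  have hb3 := countP_band idades 18 45 (by norm_num)
  have htot := countP_total idades
  have hv : criarVetor 4 0 = [0, 0, 0, 0] := by decide
  rw [hv]
  have hset : ∀ w x y z : Int,
      PySem.List.pySetD (PySem.List.pySetD (PySem.List.pySetD
        (PySem.List.pySetD [0, 0, 0, 0] 0 w) 1 x) 2 y) 3 z = [w, x, y, z] := by
    intro w x y z; rfl
  rw [hset]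
  simp only [hcnt, List.cons.injEq, and_true]
  refine ⟨?_, ?_, ?_, ?_⟩ <;> omega
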